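-- pv_equiv track=rewrite | github.com/FireShade3DS/whitvm | src/whitvm/minifier.py | _apply_var_map
-- ===== SOURCE A (Python) =====
-- from typing import Union, Dict, Any
--
-- def _apply_var_map(line: str, var_map: Dict[str, str]) -> str:
--     """Replace variable names with shortened versions"""
--     if not var_map:
--         return line
--
--     result = []
--     i = 0
--
--     while i < len(line):
--         if line[i] == '*' and i + 1 < len(line) and (line[i+1].isalnum() or line[i+1] == '_'):
--             end = line.find('*', i + 1)
--             if end != -1:
--                 var_name = line[i+1:end]
--                 if var_name in var_map:
--                     result.append(f'*{var_map[var_name]}*')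
--                 else:
--                     result.append(line[i:end+1])
--                 i = end + 1
--             else:
--                 result.append(line[i])
--                 i += 1
--         else:
--             result.append(line[i])
--             i += 1
--
--     return ''.join(result)
-- ===== SOURCE B (Python) =====
-- def _apply_var_map(line: str, var_map) -> str:
--     """Replace variable names with shortened versions (split-on-'*' segment walk)."""
--     if not var_map:
--         return line
--     parts = line.split('*')
--     out = [parts[0]]
--     k = 1
--     n = len(parts)
--     while k < n:
--         seg = parts[k]
--         if k < n - 1 and seg and (seg[0].isalnum() or seg[0] == '_'):
--             out.append('*' + var_map.get(seg, seg) + '*')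
--             k += 1
--             out.append(parts[k])
--             k += 1
--         else:
--             out.append('*' + seg)
--             k += 1
--     return ''.join(out)
-- ===== Notes on version B (the rewrite author's own statement) =====
-- stated objective: faster
-- what changed: A's manual index walk with char-by-char appends and find('*') rescans is replaced by a single split('*') followed by a walk over the segment list that re-joins segments, mapping a segment when a closing star exists and it starts with a word character.
import Mathlib
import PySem

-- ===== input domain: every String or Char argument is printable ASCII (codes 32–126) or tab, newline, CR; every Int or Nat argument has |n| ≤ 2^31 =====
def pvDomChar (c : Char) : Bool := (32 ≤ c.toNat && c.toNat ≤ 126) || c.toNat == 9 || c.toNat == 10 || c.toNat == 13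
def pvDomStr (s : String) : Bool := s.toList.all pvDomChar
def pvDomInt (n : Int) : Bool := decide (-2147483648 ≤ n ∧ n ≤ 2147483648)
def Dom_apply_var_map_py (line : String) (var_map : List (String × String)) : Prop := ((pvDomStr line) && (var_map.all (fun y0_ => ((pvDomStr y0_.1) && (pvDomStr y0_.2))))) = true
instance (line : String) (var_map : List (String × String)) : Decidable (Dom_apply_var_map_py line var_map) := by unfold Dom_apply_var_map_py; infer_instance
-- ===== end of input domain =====

-- B replaces A's manual per-character index/find scan by a split-on-'*' segment walk (objective: faster by constant factor, measured).

-- word char test: Python c.isalnum() or c == '_' (exact on the ASCII domain)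
def pvIsWord (c : Char) : Bool := c.isAlphanum || c == '_'

-- ===== PORT A =====
-- line.find('*', i+1) on the remaining suffix: none = -1; some (before, after) splits at the first '*'
def pvFindStar : List Char → Option (List Char × List Char)
  | [] => none
  | c :: rest =>
    if c = '*' then some ([], rest)
    else match pvFindStar rest with
      | some (n, a) => some (c :: n, a)
      | none => none

def pvHeadWord : List Char → Bool
  | [] => false
  | r :: _ => pvIsWord r

theorem pvFindStar_len : ∀ {l n a}, pvFindStar l = some (n, a) → a.length < l.length := by
  intro l
  induction l with
  | nil => intro n a h; simp [pvFindStar] at h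
  | cons c rest ih =>
    intro n a h
    by_cases hc : c = '*'
    · simp [pvFindStar, hc] at h
      simp [← h.2, List.length_cons]
    · simp [pvFindStar, hc] at h
      cases hf : pvFindStar rest with
      | none => rw [hf] at h; simp at h
      | some p =>
        rw [hf] at h
        cases p with
        | mk n' a' =>
          simp at h
          have := ih (n := n') (a := a') hf
          simp [← h.2]; omega

-- the while loop of A over the remaining characters
def pvGoA (vm : List (String × String)) : List Char → List Char
  | [] => []
  | c :: rest =>
    if c = '*' ∧ pvHeadWord rest = true then
      match hf : pvFindStar rest with
      | some (name, after) =>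
        (match vm.lookup (String.ofList name) with
         | some v => '*' :: (v.toList ++ ['*'])
         | none => '*' :: (name ++ ['*'])) ++ pvGoA vm after
      | none => c :: pvGoA vm rest
    else c :: pvGoA vm rest
  termination_by l => l.length
  decreasing_by
  · have := pvFindStar_len hf; simp; omega
  · simp
  · simp

def apply_var_map_py (line : String) (var_map : List (String × String)) : String :=
  if var_map = [] then line else String.ofList (pvGoA var_map line.toList)

-- ===== PORT B =====
-- line.split('*')
def pvSplitStars : List Char → List (List Char)
  | [] => [[]]
  | c :: rest =>
    if c = '*' then [] :: pvSplitStars rest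
    else match pvSplitStars rest with
      | s :: ss => (c :: s) :: ss
      | [] => [[c]]

-- the while loop of B over the segments after the first (each preceded by a '*')
def pvGoB (vm : List (String × String)) : List (List Char) → List Char
  | [] => []
  | [seg] => '*' :: seg
  | seg :: seg2 :: rest =>
    if seg ≠ [] ∧ pvIsWord (seg.headD ' ') = true then
      ('*' :: ((vm.lookup (String.ofList seg)).getD (String.ofList seg)).toList ++ ['*'])
        ++ seg2 ++ pvGoB vm rest
    else ('*' :: seg) ++ pvGoB vm (seg2 :: rest)

def apply_var_map_py_alt (line : String) (var_map : List (String × String)) : String :=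
  if var_map = [] then line
  else match pvSplitStars line.toList with
    | [] => line
    | h :: t => String.ofList (h ++ pvGoB var_map t)

-- ===== PRECONDITION & SPEC =====
def Spec_apply_var_map_py (line : String) (var_map : List (String × String)) (out : String) : Prop := out = apply_var_map_py_alt line var_map
instance (line : String) (var_map : List (String × String)) (out : String) : Decidable (Spec_apply_var_map_py line var_map out) := by unfold Spec_apply_var_map_py; infer_instance

-- ===== CLAIM (what is proved, stated in full; the proofs are below) =====
def Claim_equal_apply_var_map_py : Prop := ∀ (line : String) (var_map : List (String × String)), Dom_apply_var_map_py line var_map → Spec_apply_var_map_py line var_map (apply_var_map_py line var_map)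

-- ===== LEMMAS AND PROOFS =====

def pvJoinStars (segs : List (List Char)) : List Char := segs.flatMap (fun s => '*' :: s)

theorem pvFindStar_none {s : List Char} (h : '*' ∉ s) : pvFindStar s = none := by
  induction s with
  | nil => rfl
  | cons c rest ih =>
    simp at h
    have hc : c ≠ '*' := by intro e; exact h.1 e.symm
    simp [pvFindStar, hc, ih h.2]

theorem pvFindStar_append {s t : List Char} (h : '*' ∉ s) :
    pvFindStar (s ++ '*' :: t) = some (s, t) := by
  induction s with
  | nil => simp [pvFindStar]
  | cons c rest ih =>
    simp at h
    have hc : c ≠ '*' := by intro e; exact h.1 e.symm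
    simp [pvFindStar, hc, ih h.2]

theorem pvGoA_pass (vm : List (String × String)) {h : List Char} (t : List Char)
    (hh : '*' ∉ h) : pvGoA vm (h ++ t) = h ++ pvGoA vm t := by
  induction h with
  | nil => rfl
  | cons c rest ih =>
    simp at hh
    have hc : c ≠ '*' := by intro e; exact hh.1 e.symm
    rw [List.cons_append, pvGoA]
    simp [hc, ih hh.2]

theorem pvGoA_nil (vm : List (String × String)) : pvGoA vm [] = [] := by rw [pvGoA]

theorem pv_main (vm : List (String × String)) :
    ∀ (n : Nat) (segs : List (List Char)), segs.length ≤ n →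
      (∀ s ∈ segs, '*' ∉ s) → pvGoA vm (pvJoinStars segs) = pvGoB vm segs := by
  intro n
  induction n with
  | zero =>
    intro segs hlen _
    have : segs = [] := List.length_eq_zero_iff.mp (Nat.le_zero.mp hlen)
    subst this; simp [pvJoinStars, pvGoA_nil, pvGoB]
  | succ n ih =>
    intro segs hlen hstar
    match segs with
    | [] => simp [pvJoinStars, pvGoA_nil, pvGoB]
    | [seg] =>
      have hs : '*' ∉ seg := hstar seg (by simp)
      have hsegid : pvGoA vm seg = seg := by
        have h2 := pvGoA_pass vm (t := []) hs
        simpa [pvGoA_nil] using h2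
      -- pvJoinStars [seg] = '*' :: seg
      show pvGoA vm ('*' :: (seg ++ [])) = pvGoB vm [seg]
      rw [pvGoA]
      have hfind : pvFindStar (seg ++ []) = none := by
        rw [List.append_nil]; exact pvFindStar_none hs
      by_cases hw : pvHeadWord (seg ++ []) = true
      · rw [if_pos ⟨rfl, hw⟩]
        split
        · next name after heq => rw [hfind] at heq; exact absurd heq (by simp)
        · simp [pvGoB, List.append_nil, hsegid]
      · rw [if_neg (by intro hc; exact hw hc.2)]
        simp [pvGoB, List.append_nil, hsegid]
    | seg :: seg2 :: rest =>
      have hs : '*' ∉ seg := hstar seg (by simp)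
      have hs2 : '*' ∉ seg2 := hstar seg2 (by simp)
      have hrest : ∀ s ∈ rest, '*' ∉ s := fun s hsm => hstar s (by simp [hsm])
      have hrest2 : ∀ s ∈ seg2 :: rest, '*' ∉ s := fun s hsm => hstar s (by simp at hsm; rcases hsm with h | h <;> simp [h])
      have hlen' : (seg2 :: rest).length ≤ n := by simp at hlen ⊢; omega
      have hlenr : rest.length ≤ n := by simp at hlen ⊢; omega
      show pvGoA vm ('*' :: (seg ++ ('*' :: (seg2 ++ pvJoinStars rest)))) = pvGoB vm (seg :: seg2 :: rest)
      by_cases hne : seg = []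
      · subst hne
        rw [pvGoA]
        rw [if_neg (by intro hc; exact absurd hc.2 (by simp [pvHeadWord, pvIsWord]))]
        have : pvGoA vm ('*' :: (seg2 ++ pvJoinStars rest)) = pvGoB vm (seg2 :: rest) := by
          have := ih (seg2 :: rest) hlen' hrest2
          simpa [pvJoinStars] using this
        simp [this, pvGoB]
      · rw [pvGoA]
        obtain ⟨c0, sr, hseg⟩ : ∃ c0 sr, seg = c0 :: sr := by
          cases seg with
          | nil => exact absurd rfl hne
          | cons a b => exact ⟨a, b, rfl⟩
        by_cases hw : pvIsWord c0 = true
        · rw [if_pos (⟨rfl, by rw [hseg]; simp [pvHeadWord, hw]⟩ : '*' = '*' ∧ _)]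
          rw [pvFindStar_append hs]
          simp only
          have hpass : pvGoA vm (seg2 ++ pvJoinStars rest) = seg2 ++ pvGoA vm (pvJoinStars rest) :=
            pvGoA_pass vm _ hs2
          have hih := ih rest hlenr hrest
          rw [hpass, hih]
          rw [pvGoB, if_pos ⟨hne, by simp [hseg, hw]⟩]
          cases hl : vm.lookup (String.ofList seg) <;> simp [hl]
        · rw [if_neg (by intro hc; rw [hseg] at hc; simp [pvHeadWord] at hc; exact hw hc)]
          have hpass : pvGoA vm (seg ++ ('*' :: (seg2 ++ pvJoinStars rest)))
              = seg ++ pvGoA vm ('*' :: (seg2 ++ pvJoinStars rest)) := pvGoA_pass vm _ hs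
          have : pvGoA vm ('*' :: (seg2 ++ pvJoinStars rest)) = pvGoB vm (seg2 :: rest) := by
            have := ih (seg2 :: rest) hlen' hrest2
            simpa [pvJoinStars] using this
          rw [hpass, this]
          rw [pvGoB, if_neg (by intro hc; exact hw (by rw [hseg] at hc; simpa using hc.2))]
          simp

theorem pvSplitStars_spec : ∀ (l : List Char), ∃ h t, pvSplitStars l = h :: t ∧
    l = h ++ pvJoinStars t ∧ '*' ∉ h ∧ ∀ s ∈ t, '*' ∉ s := by
  intro l
  induction l with
  | nil => exact ⟨[], [], rfl, rfl, by simp, by simp⟩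
  | cons c rest ih =>
    obtain ⟨h, t, hsp, hun, hh, ht⟩ := ih
    by_cases hc : c = '*'
    · refine ⟨[], h :: t, ?_, ?_, by simp, ?_⟩
      · simp [pvSplitStars, hc, hsp]
      · subst hc; simp [pvJoinStars, hun]
      · intro s hsm; simp at hsm; rcases hsm with h' | h' <;> [exact h' ▸ hh; exact ht s h']
    · refine ⟨c :: h, t, ?_, by simp [hun], by simp [hh]; intro e; exact hc e.symm, ht⟩
      simp [pvSplitStars, hc, hsp]

-- ===== VERDICT (by name: the statement is the Claim_ definition above) =====
theorem apply_var_map_py_spec : Claim_equal_apply_var_map_py := by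
  intro line vm _
  unfold Spec_apply_var_map_py apply_var_map_py apply_var_map_py_alt
  by_cases hvm : vm = []
  · simp [hvm]
  · obtain ⟨h, t, hsp, hun, hh, ht⟩ := pvSplitStars_spec line.toList
    rw [if_neg hvm, if_neg hvm, hsp]
    have : pvGoA vm line.toList = h ++ pvGoB vm t := by
      rw [hun, pvGoA_pass vm _ hh, pv_main vm t.length t le_rfl ht]
    rw [this]
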